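-- pv_equiv track=rewrite | github.com/aruzu/ai-product-engineering | Gaiar_Baimuratov/lesson2/userboard4-baimuratov.py | create_sentiment_prompt
-- ===== SOURCE A (Python) =====
-- def create_sentiment_prompt(transcript, personas):
--     persona_responses = {}
--     for p in personas:
--         persona_responses[p["name"]] = []
--
--     current_question = None
--
--     for msg in transcript:
--         if msg.get("role") == "user":
--             current_question = msg.get("content", "")
--         elif msg.get("role") == "assistant" and "name" in msg and msg.get("name") in persona_responses:
--             name = msg.get("name")
--             content = msg.get("content", "")
--             persona_responses[name].append({
--                 "question": current_question,
--                 "response": content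
--             })
--
--     # Create a prompt with each persona's responses
--     prompt = "Analyze the sentiment and key points from each persona in this interview:\n\n"
--
--     for name, responses in persona_responses.items():
--         prompt += f"## {name}\n"
--         for resp in responses:
--             prompt += f"Question: {resp['question']}\n"
--             prompt += f"Response: {resp['response']}\n\n"
--
--     return [
--         {"role": "system", "content": "You are a sentiment analysis expert."},
--         {"role": "user", "content": prompt}
--     ]
-- ===== SOURCE B (Python) =====
-- def create_sentiment_prompt(transcript, personas):
--     # Dedup persona names preserving first occurrence.
--     names = []
--     for p in personas:
--         n = p["name"]
--         if n not in names:
--             names.append(n)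
--
--     def persona_block(name):
--         # Independent scan of the transcript for this one persona.
--         lines = ["## %s\n" % name]
--         question = None
--         for msg in transcript:
--             role = msg.get("role")
--             if role == "user":
--                 question = msg.get("content", "")
--             elif role == "assistant" and msg.get("name") == name:
--                 lines.append("Question: %s\nResponse: %s\n\n" % (question, msg.get("content", "")))
--         return "".join(lines)
--
--     prompt = ("Analyze the sentiment and key points from each persona in this interview:\n\n"
--               + "".join(persona_block(n) for n in names))
--     return [
--         {"role": "system", "content": "You are a sentiment analysis expert."},
--         {"role": "user", "content": prompt},
--     ]
-- ===== Notes on version B (the rewrite author's own statement) =====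
-- stated objective: alternative
-- what changed: A builds a dict of per-persona response lists in one grouping pass and then walks the dict items; B has no grouping structure at all: it dedups the names with a list loop and then, per persona, makes an independent staged pass over the transcript emitting that persona's block directly, joining the blocks.
import Mathlib
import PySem

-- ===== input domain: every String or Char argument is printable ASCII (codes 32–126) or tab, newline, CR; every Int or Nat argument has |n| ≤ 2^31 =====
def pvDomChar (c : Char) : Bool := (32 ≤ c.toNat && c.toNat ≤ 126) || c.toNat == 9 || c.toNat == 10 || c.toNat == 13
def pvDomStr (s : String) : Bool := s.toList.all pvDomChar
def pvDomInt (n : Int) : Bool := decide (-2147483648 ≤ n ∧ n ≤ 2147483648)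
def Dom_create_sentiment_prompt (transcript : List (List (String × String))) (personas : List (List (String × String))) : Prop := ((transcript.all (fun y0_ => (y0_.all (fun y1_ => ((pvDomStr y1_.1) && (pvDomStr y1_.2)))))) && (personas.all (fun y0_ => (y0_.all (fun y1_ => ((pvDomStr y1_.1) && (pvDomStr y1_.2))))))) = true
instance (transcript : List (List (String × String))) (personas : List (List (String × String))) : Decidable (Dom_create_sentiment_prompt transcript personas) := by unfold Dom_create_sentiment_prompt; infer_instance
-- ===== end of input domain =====

-- B replaces A's single grouping pass into a dict of per-persona lists by staged
-- independent per-persona passes over the transcript (objective: alternative).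

-- msg.get(k) on a message dict (assoc list, first match) — shared by both ports
def mget (m : List (String × String)) (k : String) : Option String :=
  (PySem.Dict.mk m).get? k

-- msg.get(k, dflt)
def mgetD (m : List (String × String)) (k : String) (dflt : String) : String :=
  ((PySem.Dict.mk m).get? k).getD dflt

-- %s rendering of the possibly-None current question
def qstr : Option String → String
  | none => "None"
  | some s => s

-- ===== PORT A =====
def create_sentiment_prompt (transcript : List (List (String × String))) (personas : List (List (String × String))) : List (List (String × String)) :=
  -- persona_responses = {}; for p in personas: persona_responses[p["name"]] = []
  let pr0 : PySem.Dict String (List (Option String × String)) :=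
    personas.foldl (fun d p => d.insert (mgetD p "name" "") []) PySem.Dict.empty
  -- current_question = None; for msg in transcript: …
  let st := transcript.foldl
    (fun (st : Option String × PySem.Dict String (List (Option String × String))) msg =>
      if mget msg "role" == some "user" then
        (some (mgetD msg "content" ""), st.2)
      else if mget msg "role" == some "assistant" && (mget msg "name").isSome
              && st.2.contains (mgetD msg "name" "") then
        (st.1, st.2.modify (mgetD msg "name" "") []
                 (fun rs => rs ++ [(st.1, mgetD msg "content" "")]))
      else st)
    (none, pr0)
  -- prompt = header; for name, responses in persona_responses.items(): …
  let prompt := st.2.items.foldl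
    (fun acc nr =>
      nr.2.foldl
        (fun a r => a ++ ("Question: " ++ qstr r.1 ++ "\n" ++ ("Response: " ++ r.2 ++ "\n\n")))
        (acc ++ ("## " ++ nr.1 ++ "\n")))
    "Analyze the sentiment and key points from each persona in this interview:\n\n"
  [[("role", "system"), ("content", "You are a sentiment analysis expert.")],
   [("role", "user"), ("content", prompt)]]

-- ===== PORT B =====
-- the lines persona_block's loop appends for one persona (beyond the header line)
def collectLines (name : String) : Option String → List (List (String × String)) → List String
  | _, [] => []
  | question, msg :: rest =>
      if mget msg "role" == some "user" then
        collectLines name (some (mgetD msg "content" "")) rest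
      else if mget msg "role" == some "assistant" && mget msg "name" == some name then
        ("Question: " ++ qstr question ++ "\nResponse: " ++ mgetD msg "content" "" ++ "\n\n")
          :: collectLines name question rest
      else collectLines name question rest

-- persona_block(name): lines = ["## name\n"]; …; return "".join(lines)
def personaBlock (transcript : List (List (String × String))) (name : String) : String :=
  PySem.Str.join "" (("## " ++ name ++ "\n") :: collectLines name none transcript)

def create_sentiment_prompt_alt (transcript : List (List (String × String))) (personas : List (List (String × String))) : List (List (String × String)) :=
  -- names = []; for p in personas: if p["name"] not in names: names.append(p["name"])
  let names : List String :=
    personas.foldl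
      (fun ns p => if ns.contains (mgetD p "name" "") then ns else ns ++ [mgetD p "name" ""]) []
  let prompt :=
    "Analyze the sentiment and key points from each persona in this interview:\n\n"
      ++ PySem.Str.join "" (names.map (personaBlock transcript))
  [[("role", "system"), ("content", "You are a sentiment analysis expert.")],
   [("role", "user"), ("content", prompt)]]

-- ===== PRECONDITION & SPEC =====
-- Pre_ excludes personas lacking a "name" key, on which both Pythons raise KeyError.
def Pre_create_sentiment_prompt (transcript : List (List (String × String))) (personas : List (List (String × String))) : Prop :=
  personas.all (fun p => (mget p "name").isSome) = true
instance (transcript : List (List (String × String))) (personas : List (List (String × String))) : Decidable (Pre_create_sentiment_prompt transcript personas) := by unfold Pre_create_sentiment_prompt; infer_instance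

def pvWitness_create_sentiment_prompt : (List (List (String × String))) × (List (List (String × String))) :=
  ([[("role", "user"), ("content", "Q1")],
    [("role", "assistant"), ("name", "Alice"), ("content", "R1")]],
   [[("name", "Alice")], [("name", "Bob")]])

def Spec_create_sentiment_prompt (transcript : List (List (String × String))) (personas : List (List (String × String))) (out : List (List (String × String))) : Prop := out = create_sentiment_prompt_alt transcript personas
instance (transcript : List (List (String × String))) (personas : List (List (String × String))) (out : List (List (String × String))) : Decidable (Spec_create_sentiment_prompt transcript personas out) := by unfold Spec_create_sentiment_prompt; infer_instance

-- ===== CLAIM (what is proved, stated in full; the proofs are below) =====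
def Claim_equal_create_sentiment_prompt : Prop := ∀ (transcript : List (List (String × String))) (personas : List (List (String × String))), Dom_create_sentiment_prompt transcript personas → Pre_create_sentiment_prompt transcript personas → Spec_create_sentiment_prompt transcript personas (create_sentiment_prompt transcript personas)

-- ===== LEMMAS AND PROOFS =====

-- the rendering of one stored response of A as the line B emits for it
def render (r : Option String × String) : String :=
  "Question: " ++ qstr r.1 ++ "\nResponse: " ++ r.2 ++ "\n\n"

-- "".join(s :: rest) = s ++ "".join(rest)
lemma join_empty_cons (s : String) (xs : List String) :
    PySem.Str.join "" (s :: xs) = s ++ PySem.Str.join "" xs := by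
  cases xs with
  | nil => simp [PySem.Str.join, PySem.Chars.join_singleton, PySem.Chars.join_nil]
  | cons t ts => simp [PySem.Str.join, PySem.Chars.join_cons_cons]

lemma join_empty_nil : PySem.Str.join "" ([] : List String) = "" := by
  simp [PySem.Str.join, PySem.Chars.join_nil]

lemma nl_resp (x : String) : "\n" ++ ("Response: " ++ x) = "\nResponse: " ++ x := by
  rw [← String.append_assoc]; rfl

-- every value in A's initial persona dict is []
lemma init_getD (personas : List (List (String × String)))
    (d : PySem.Dict String (List (Option String × String)))
    (h : ∀ n, d.getD n [] = []) (n : String) :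
    (personas.foldl (fun d p => d.insert (mgetD p "name" "") []) d).getD n [] = [] := by
  induction personas generalizing d with
  | nil => exact h n
  | cons p ps ih =>
      simp only [List.foldl_cons]
      exact ih _ (fun m => by rw [PySem.Dict.getD_insert]; split <;> simp [h])

-- the inner fold of A's prompt loop appends one rendered line per response
lemma inner_fold (rs : List (Option String × String)) (a : String) :
    rs.foldl
      (fun a r => a ++ ("Question: " ++ qstr r.1 ++ "\n" ++ ("Response: " ++ r.2 ++ "\n\n"))) a
    = a ++ PySem.Str.join "" (rs.map render) := by
  induction rs generalizing a with
  | nil => simp [join_empty_nil]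
  | cons r rs ih =>
      rw [List.foldl_cons, List.map_cons, join_empty_cons, ih]
      simp only [render, String.append_assoc, nl_resp]

-- the outer fold of A's prompt loop appends one block per items entry
lemma outer_fold (items : List (String × List (Option String × String))) (a : String) :
    items.foldl
      (fun acc nr =>
        nr.2.foldl
          (fun a r => a ++ ("Question: " ++ qstr r.1 ++ "\n" ++ ("Response: " ++ r.2 ++ "\n\n")))
          (acc ++ ("## " ++ nr.1 ++ "\n"))) a
    = a ++ PySem.Str.join ""
        (items.map (fun nr => "## " ++ nr.1 ++ "\n" ++ PySem.Str.join "" (nr.2.map render))) := by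
  induction items generalizing a with
  | nil => simp [join_empty_nil]
  | cons nr rest ih =>
      rw [List.foldl_cons, List.map_cons, join_empty_cons, inner_fold, ih]
      simp [String.append_assoc]

-- invariant of A's transcript loop: keys stay `names`, and the rendered content of each
-- persona's dict entry grows by exactly the lines B's independent per-persona scan emits
lemma foldA_inv (names : List String) (transcript : List (List (String × String)))
    (cq : Option String) (d : PySem.Dict String (List (Option String × String)))
    (hk : d.keys = names) :
    let sA := transcript.foldl
      (fun (st : Option String × PySem.Dict String (List (Option String × String))) msg =>
        if mget msg "role" == some "user" then
          (some (mgetD msg "content" ""), st.2)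
        else if mget msg "role" == some "assistant" && (mget msg "name").isSome
                && st.2.contains (mgetD msg "name" "") then
          (st.1, st.2.modify (mgetD msg "name" "") []
                   (fun rs => rs ++ [(st.1, mgetD msg "content" "")]))
        else st)
      (cq, d)
    sA.2.keys = names ∧
      ∀ n ∈ names, (sA.2.getD n []).map render
        = (d.getD n []).map render ++ collectLines n cq transcript := by
  induction transcript generalizing cq d with
  | nil => exact ⟨hk, fun n _ => by simp [collectLines]⟩
  | cons msg rest ih =>
      simp only [List.foldl_cons]
      cases hu : (mget msg "role" == some "user") with
      | true =>
          simp only [if_true]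
          obtain ⟨hk', hv'⟩ := ih (some (mgetD msg "content" "")) d hk
          exact ⟨hk', fun n hn => by
            rw [hv' n hn]; simp [collectLines, hu]⟩
      | false =>
          simp only [Bool.false_eq_true, if_false]
          have hcont : ∀ m : String, d.contains m = names.contains m := by
            intro m; rw [PySem.Dict.contains_eq_decide_mem_keys, hk, List.contains_eq_mem]
          cases hg : (mget msg "role" == some "assistant" && (mget msg "name").isSome
                  && d.contains (mgetD msg "name" "")) with
          | true =>
              simp only [if_true]
              have h3 := hg
              simp only [Bool.and_eq_true] at h3
              obtain ⟨⟨hrole, hsome⟩, hcd⟩ := h3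
              have hgd : mgetD msg "name" "" = (mget msg "name").getD "" := rfl
              have hname : mget msg "name" = some (mgetD msg "name" "") := by
                cases hms : mget msg "name" with
                | none => rw [hms] at hsome; simp at hsome
                | some v => rw [hgd, hms]; rfl
              obtain ⟨hk', hv'⟩ := ih cq
                (d.modify (mgetD msg "name" "") [] (fun rs => rs ++ [(cq, mgetD msg "content" "")]))
                (by rw [PySem.Dict.keys_modify, PySem.Dict.keys_insert_of_contains _ _ hcd, hk])
              refine ⟨hk', fun n hn => ?_⟩
              rw [hv' n hn]
              by_cases hne : n = mgetD msg "name" ""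
              · subst hne
                rw [PySem.Dict.getD_modify, if_pos rfl]
                have hc : (mget msg "role" == some "assistant"
                    && mget msg "name" == some (mgetD msg "name" "")) = true := by
                  rw [Bool.and_eq_true]
                  exact ⟨hrole, by rw [hname]; exact beq_self_eq_true _⟩
                simp [collectLines, hu, hc, render, List.append_assoc]
              · have hc : (mget msg "name" == some n) = false := by
                  rw [hname, beq_eq_false_iff_ne]
                  exact fun h => hne (Option.some.inj h).symm
                rw [PySem.Dict.getD_modify, if_neg hne]
                simp [collectLines, hu, hc]
          | false =>
              simp only [Bool.false_eq_true, if_false]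
              obtain ⟨hk', hv'⟩ := ih cq d hk
              refine ⟨hk', fun n hn => ?_⟩
              rw [hv' n hn]
              have hc : (mget msg "role" == some "assistant" && mget msg "name" == some n) = false := by
                cases hcc : (mget msg "role" == some "assistant" && mget msg "name" == some n) with
                | false => rfl
                | true =>
                    exfalso
                    simp only [Bool.and_eq_true, beq_iff_eq] at hcc
                    obtain ⟨hrole, hnm⟩ := hcc
                    have hgd : mgetD msg "name" "" = (mget msg "name").getD "" := rfl
                    have hkeyn : mgetD msg "name" "" = n := by rw [hgd, hnm]; rfl
                    have hgt : (mget msg "role" == some "assistant" && (mget msg "name").isSome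
                        && d.contains (mgetD msg "name" "")) = true := by
                      rw [Bool.and_eq_true, Bool.and_eq_true]
                      refine ⟨⟨by simp [hrole], by simp [hnm]⟩, ?_⟩
                      rw [hcont, hkeyn, List.contains_eq_mem]
                      simpa using hn
                    rw [hgt] at hg; cases hg
              simp [collectLines, hu, hc]

-- ===== VERDICT (by name: the statement is the Claim_ definition above) =====
theorem create_sentiment_prompt_spec : Claim_equal_create_sentiment_prompt := by
  intro transcript personas _hdom _hpre
  unfold Spec_create_sentiment_prompt create_sentiment_prompt create_sentiment_prompt_alt
  simp only []
  -- B's dedup loop is set-of-list construction; it equals A's dict's key list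
  have hfold : personas.foldl
      (fun ns p => if ns.contains (mgetD p "name" "") then ns else ns ++ [mgetD p "name" ""]) []
      = PySem.Set.ofList (personas.map (fun p => mgetD p "name" "")) := by
    rw [← PySem.Set.update_nil_left, PySem.Set.update_map_eq_foldl_add]
    rfl
  rw [hfold]
  have hkeys0 : (personas.foldl (fun d p => d.insert (mgetD p "name" "") [])
      (PySem.Dict.empty : PySem.Dict String (List (Option String × String)))).keys
      = PySem.Set.ofList (personas.map (fun p => mgetD p "name" "")) := by
    rw [PySem.Dict.keys_foldl_insert_key personas (fun p => mgetD p "name" "") (fun _ _ => [])]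
    rw [show (PySem.Dict.empty : PySem.Dict String (List (Option String × String))).keys
          = ([] : List String) from PySem.Dict.keys_empty,
        PySem.Set.update_nil_left]
  have hv0 : ∀ n, (personas.foldl (fun d p => d.insert (mgetD p "name" "") [])
      (PySem.Dict.empty : PySem.Dict String (List (Option String × String)))).getD n [] = [] :=
    init_getD personas _ (fun n => by simp [PySem.Dict.getD_empty])
  obtain ⟨hk, hv⟩ := foldA_inv (PySem.Set.ofList (personas.map (fun p => mgetD p "name" "")))
    transcript none _ hkeys0
  rw [PySem.Dict.items_eq_map_keys _
        (by rw [hk]; exact PySem.Set.nodup_ofList _) ([] : List (Option String × String)), hk]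
  rw [outer_fold]
  have hmap : ∀ n ∈ PySem.Set.ofList (personas.map (fun p => mgetD p "name" "")),
      ((fun nr => "## " ++ nr.1 ++ "\n" ++ PySem.Str.join "" (nr.2.map render)) ∘
        (fun k => (k, (transcript.foldl
          (fun (st : Option String × PySem.Dict String (List (Option String × String))) msg =>
            if mget msg "role" == some "user" then
              (some (mgetD msg "content" ""), st.2)
            else if mget msg "role" == some "assistant" && (mget msg "name").isSome
                    && st.2.contains (mgetD msg "name" "") then
              (st.1, st.2.modify (mgetD msg "name" "") []
                       (fun rs => rs ++ [(st.1, mgetD msg "content" "")]))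
            else st)
          (none, personas.foldl (fun d p => d.insert (mgetD p "name" "") []) PySem.Dict.empty)).2.getD k []))) n
      = personaBlock transcript n := by
    intro n hn
    simp only [Function.comp]
    rw [hv n hn, hv0 n]
    simp only [List.map_nil, List.nil_append, personaBlock, join_empty_cons]
  rw [List.map_map, List.map_congr_left hmap]
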